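-- pv_equiv track=rewrite | github.com/ANekhai/Bio-scripts | filter_reads.py | find_all_unique_sequences
-- ===== SOURCE A (Python) =====
-- def find_all_unique_sequences(data, ref):
--     sequences = set()
--     seq_map = dict()
--
--     for line in data:
--         if len(line) == 7 and line[1] != "name" and line[1] != ref:
--             sequences.add(line[1])
--             if line[1] not in seq_map:
--                 seq_map[line[1]] = [[line[2], line[3], line[5]]]
--             else:
--                 seq_map[line[1]].append([line[2], line[3], line[5]])
--
--     return sequences, seq_map
-- ===== SOURCE B (Python) =====
-- def find_all_unique_sequences(data, ref):
--     filtered = [line for line in data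
--                 if len(line) == 7 and line[1] != "name" and line[1] != ref]
--     keys = list(dict.fromkeys(line[1] for line in filtered))
--     seq_map = {k: [[l[2], l[3], l[5]] for l in filtered if l[1] == k]
--                for k in keys}
--     return set(keys), seq_map
-- ===== Notes on version B (the rewrite author's own statement) =====
-- stated objective: alternative
-- what changed: A's single stateful loop that mutates a set and a dict per line is replaced by a filter-then-group pipeline: filter once, dedup the keys with dict.fromkeys, and build each key's value list by a per-key comprehension over the filtered lines.
import Mathlib
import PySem

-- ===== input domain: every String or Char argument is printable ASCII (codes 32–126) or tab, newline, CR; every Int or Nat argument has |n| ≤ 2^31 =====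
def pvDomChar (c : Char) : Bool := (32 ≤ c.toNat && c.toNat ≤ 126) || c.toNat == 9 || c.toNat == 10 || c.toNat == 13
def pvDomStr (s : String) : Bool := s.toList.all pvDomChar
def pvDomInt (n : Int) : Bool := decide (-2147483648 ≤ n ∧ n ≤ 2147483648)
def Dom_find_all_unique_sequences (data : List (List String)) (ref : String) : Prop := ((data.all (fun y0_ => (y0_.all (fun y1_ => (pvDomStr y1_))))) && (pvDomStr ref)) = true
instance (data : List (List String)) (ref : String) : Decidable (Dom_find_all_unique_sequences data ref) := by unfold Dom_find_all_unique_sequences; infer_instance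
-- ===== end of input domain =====

-- B replaces A's single stateful loop (set and dict mutated per line) by filter-then-group:
-- filter once, dedup the keys, and build each key's group by a per-key scan (objective: alternative).


-- line[i]; only evaluated under the guard len(line) == 7, where the index is in range
def pvNth (line : List String) (i : Nat) : String := (PySem.List.pyGet? line (i : Int)).getD ""

-- ===== PORT A =====
def find_all_unique_sequences (data : List (List String)) (ref : String) : List String × (List (String × List (List String))) :=
  let st := data.foldl
    (fun (st : PySem.Set String × PySem.Dict String (List (List String))) line =>
      if line.length == 7 && pvNth line 1 != "name" && pvNth line 1 != ref then
        (PySem.Set.add st.1 (pvNth line 1),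
         match st.2.get? (pvNth line 1) with
         | none => st.2.insert (pvNth line 1) [[pvNth line 2, pvNth line 3, pvNth line 5]]
         | some xs => st.2.insert (pvNth line 1) (xs ++ [[pvNth line 2, pvNth line 3, pvNth line 5]]))
      else st)
    (PySem.Set.empty, PySem.Dict.empty)
  (st.1, st.2.items)

-- ===== PORT B =====
def pvPred (ref : String) (line : List String) : Bool :=
  line.length == 7 && pvNth line 1 != "name" && pvNth line 1 != ref

def find_all_unique_sequences_alt (data : List (List String)) (ref : String) : List String × (List (String × List (List String))) :=
  let filtered := data.filter (pvPred ref)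
  let keys := PySem.List.dedup (filtered.map (fun l => pvNth l 1))
  let seq_map := keys.map (fun k =>
    (k, (filtered.filter (fun l => pvNth l 1 == k)).map (fun l => [pvNth l 2, pvNth l 3, pvNth l 5])))
  (PySem.Set.ofList keys, seq_map)

-- ===== PRECONDITION & SPEC =====
def Spec_find_all_unique_sequences (data : List (List String)) (ref : String) (out : List String × (List (String × List (List String)))) : Prop := out = find_all_unique_sequences_alt data ref
instance (data : List (List String)) (ref : String) (out : List String × (List (String × List (List String)))) : Decidable (Spec_find_all_unique_sequences data ref out) := by unfold Spec_find_all_unique_sequences; infer_instance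

-- ===== CLAIM (what is proved, stated in full; the proofs are below) =====
def Claim_equal_find_all_unique_sequences : Prop := ∀ (data : List (List String)) (ref : String), Dom_find_all_unique_sequences data ref → Spec_find_all_unique_sequences data ref (find_all_unique_sequences data ref)

-- ===== LEMMAS AND PROOFS =====

-- A's single loop over a (set, dict) pair splits into two independent loops over the filtered lines,
-- the dict step rewritten as a 'modify … (· ++ [value])'.
theorem pv_fold_split (data : List (List String)) (ref : String) :
    (data.foldl
      (fun (st : PySem.Set String × PySem.Dict String (List (List String))) line =>
        if line.length == 7 && pvNth line 1 != "name" && pvNth line 1 != ref then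
          (PySem.Set.add st.1 (pvNth line 1),
           match st.2.get? (pvNth line 1) with
           | none => st.2.insert (pvNth line 1) [[pvNth line 2, pvNth line 3, pvNth line 5]]
           | some xs => st.2.insert (pvNth line 1) (xs ++ [[pvNth line 2, pvNth line 3, pvNth line 5]]))
        else st)
      (PySem.Set.empty, PySem.Dict.empty)) =
    ((data.filter (pvPred ref)).foldl (fun s l => PySem.Set.add s (pvNth l 1)) PySem.Set.empty,
     (data.filter (pvPred ref)).foldl (fun m l => PySem.Dict.modify m (pvNth l 1) [] (· ++ [[pvNth l 2, pvNth l 3, pvNth l 5]])) PySem.Dict.empty) := by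
  rw [PySem.List.foldl_congr_mem (g := fun st line =>
      (if pvPred ref line then PySem.Set.add st.1 (pvNth line 1) else st.1,
       if pvPred ref line then PySem.Dict.modify st.2 (pvNth line 1) [] (· ++ [[pvNth line 2, pvNth line 3, pvNth line 5]]) else st.2))]
  · rw [PySem.List.foldl_prod_mk (f := fun (s : PySem.Set String) e => if pvPred ref e then PySem.Set.add s (pvNth e 1) else s)
        (g := fun (m : PySem.Dict String (List (List String))) e => if pvPred ref e then PySem.Dict.modify m (pvNth e 1) [] (· ++ [[pvNth e 2, pvNth e 3, pvNth e 5]]) else m)]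
    rw [PySem.List.foldl_if_eq_foldl_filter, PySem.List.foldl_if_eq_foldl_filter]
  · intro acc x _
    simp only [pvPred]
    split
    · cases h : acc.2.get? (pvNth x 1) <;>
        simp [PySem.Dict.modify, PySem.Dict.getD_eq_get?_getD, h]
    · rfl

-- the set accumulated by A is exactly set(keys) of the deduplicated key list
theorem pv_set_side (fl : List (List String)) :
    fl.foldl (fun s l => PySem.Set.add s (pvNth l 1)) PySem.Set.empty
      = PySem.Set.ofList (PySem.List.dedup (fl.map (fun l => pvNth l 1))) := by
  simp only [PySem.List.dedup_eq_ofList, PySem.Set.ofList_ofList]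
  rw [PySem.Set.ofList_eq_foldl, List.foldl_map]
  rfl

-- the dict accumulated by A lists, per first-occurrence key, the projections of its lines in order
theorem pv_dict_side (fl : List (List String)) :
    (fl.foldl (fun (m : PySem.Dict String (List (List String))) l =>
        PySem.Dict.modify m (pvNth l 1) [] (· ++ [[pvNth l 2, pvNth l 3, pvNth l 5]])) PySem.Dict.empty).items
      = (PySem.List.dedup (fl.map (fun l => pvNth l 1))).map (fun k =>
          (k, (fl.filter (fun l => pvNth l 1 == k)).map (fun l => [pvNth l 2, pvNth l 3, pvNth l 5]))) := by
  set d := fl.foldl (fun (m : PySem.Dict String (List (List String))) l =>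
      PySem.Dict.modify m (pvNth l 1) [] (· ++ [[pvNth l 2, pvNth l 3, pvNth l 5]])) PySem.Dict.empty with hd
  have hkeys : d.keys = PySem.Set.ofList (fl.map (fun l => pvNth l 1)) := by
    rw [hd, PySem.Dict.keys_foldl_modify_key]
    simp [PySem.Set.update, PySem.Set.ofList_eq_foldl, PySem.Dict.keys_empty]
  have hnd : d.keys.Nodup := by
    rw [hkeys]; exact PySem.Set.nodup_ofList _
  have hgetD : ∀ k, d.getD k [] = (fl.filter (fun l => pvNth l 1 == k)).map (fun l => [pvNth l 2, pvNth l 3, pvNth l 5]) := by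
    intro k
    have : d = (fl.map (fun l => ((pvNth l 1), [pvNth l 2, pvNth l 3, pvNth l 5]))).foldl
        (fun (m : PySem.Dict String (List (List String))) p => PySem.Dict.modify m p.1 [] (· ++ [p.2])) PySem.Dict.empty := by
      rw [hd, List.foldl_map]
    rw [this, PySem.Dict.getD_foldl_modify_append, List.filter_map]
    simp only [PySem.Dict.getD_empty, List.map_map, List.nil_append]
    rfl
  rw [PySem.Dict.items_eq_map_keys d hnd [], hkeys]
  simp only [PySem.List.dedup_eq_ofList]
  exact List.map_congr_left (fun k _ => by rw [hgetD k])

-- ===== VERDICT (by name: the statement is the Claim_ definition above) =====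
theorem find_all_unique_sequences_spec : Claim_equal_find_all_unique_sequences := by
  intro data ref _
  show find_all_unique_sequences data ref = find_all_unique_sequences_alt data ref
  show ((data.foldl
      (fun (st : PySem.Set String × PySem.Dict String (List (List String))) line =>
        if line.length == 7 && pvNth line 1 != "name" && pvNth line 1 != ref then
          (PySem.Set.add st.1 (pvNth line 1),
           match st.2.get? (pvNth line 1) with
           | none => st.2.insert (pvNth line 1) [[pvNth line 2, pvNth line 3, pvNth line 5]]
           | some xs => st.2.insert (pvNth line 1) (xs ++ [[pvNth line 2, pvNth line 3, pvNth line 5]]))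
        else st)
      (PySem.Set.empty, PySem.Dict.empty)).1,
    (data.foldl
      (fun (st : PySem.Set String × PySem.Dict String (List (List String))) line =>
        if line.length == 7 && pvNth line 1 != "name" && pvNth line 1 != ref then
          (PySem.Set.add st.1 (pvNth line 1),
           match st.2.get? (pvNth line 1) with
           | none => st.2.insert (pvNth line 1) [[pvNth line 2, pvNth line 3, pvNth line 5]]
           | some xs => st.2.insert (pvNth line 1) (xs ++ [[pvNth line 2, pvNth line 3, pvNth line 5]]))
        else st)
      (PySem.Set.empty, PySem.Dict.empty)).2.items) =
    (PySem.Set.ofList (PySem.List.dedup ((data.filter (pvPred ref)).map (fun l => pvNth l 1))),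
     (PySem.List.dedup ((data.filter (pvPred ref)).map (fun l => pvNth l 1))).map (fun k =>
       (k, ((data.filter (pvPred ref)).filter (fun l => pvNth l 1 == k)).map (fun l => [pvNth l 2, pvNth l 3, pvNth l 5]))))
  rw [pv_fold_split data ref]
  exact Prod.ext_iff.mpr ⟨pv_set_side _, pv_dict_side _⟩
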